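-- pv_equiv track=rewrite | github.com/pauloALuis/LP | SeriesDeProblemas2/pb6.py | vocal_repetition
-- ===== SOURCE A (Python) =====
-- vocals = ["a", "e", "i", "o", "u"]
--
-- def vocal_repetition(vocals: list = vocals, s: str = "aaabbbccc"):
--     """
--     method that calculates the number of vocals duplicated in a string
--     @param s : the string
--     @return number of vocals duplicated in "s"
--     """
--     counter = 0
--     l = []
--     [l.append(False) for _ in range(len(vocals))]
--
--     for letter in s:
--         for vocal in range(len(vocals)):
--             if letter == vocals[vocal] and l[vocal] == True:
--                 counter +=1
--             elif letter == vocals[vocal] and l[vocal] == False: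
--                 l[vocal] = True
--     return counter
-- ===== SOURCE B (Python) =====
-- vocals = ["a", "e", "i", "o", "u"]
--
-- def vocal_repetition(vocals: list = vocals, s: str = "aaabbbccc"):
--     """Tabulate-then-reduce: one frequency table of s, then one pass over vocals."""
--     freq = {}
--     for ch in s:
--         freq[ch] = freq.get(ch, 0) + 1
--     return sum(max(freq.get(v, 0) - 1, 0) for v in vocals)
-- ===== Notes on version B (the rewrite author's own statement) =====
-- stated objective: faster
-- what changed: Replaced A's nested per-character scan over vocal indices with flag tracking by a single frequency table of s followed by one pass over vocals summing max(count-1, 0), dropping the |vocals| factor per character.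
import Mathlib
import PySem

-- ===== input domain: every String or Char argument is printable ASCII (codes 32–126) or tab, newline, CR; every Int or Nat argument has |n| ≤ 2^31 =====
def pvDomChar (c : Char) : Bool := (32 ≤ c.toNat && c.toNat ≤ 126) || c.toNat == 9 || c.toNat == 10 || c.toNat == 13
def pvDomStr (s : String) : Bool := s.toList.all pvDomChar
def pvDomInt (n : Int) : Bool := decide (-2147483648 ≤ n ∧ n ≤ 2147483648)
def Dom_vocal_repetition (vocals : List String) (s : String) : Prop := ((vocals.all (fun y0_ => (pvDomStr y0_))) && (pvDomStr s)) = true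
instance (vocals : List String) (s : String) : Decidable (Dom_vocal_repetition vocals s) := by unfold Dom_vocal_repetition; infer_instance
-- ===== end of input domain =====

-- B replaces A's nested per-character scan over vocal indices (with flag tracking)
-- by one frequency table of s and a single pass over vocals; objective: simpler.


-- ===== PORT A =====
-- inner 'for vocal in range(len(vocals))' body; vocals[vocal] is in range, so getD is exact
def innerStepA (vocals : List String) (letter : Char) (st : Int × List Bool) (vocal : Nat) : Int × List Bool :=
  if (String.ofList [letter] == vocals.getD vocal "") && (st.2.getD vocal false == true) then
    (st.1 + 1, st.2)
  else if (String.ofList [letter] == vocals.getD vocal "") && (st.2.getD vocal false == false) then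
    (st.1, st.2.set vocal true)
  else st

def vocal_repetition (vocals : List String) (s : String) : Int :=
  let l0 : List Bool := (List.range vocals.length).map (fun _ => false)
  (s.toList.foldl
    (fun st letter => (List.range vocals.length).foldl (innerStepA vocals letter) st)
    (0, l0)).1

-- ===== PORT B =====
def vocal_repetition_alt (vocals : List String) (s : String) : Int :=
  let freq : PySem.Dict String Int :=
    s.toList.foldl (fun d ch => d.insert (String.ofList [ch]) (d.getD (String.ofList [ch]) 0 + 1))
      PySem.Dict.empty
  (vocals.map (fun v => max (freq.getD v 0 - 1) 0)).sum

-- ===== PRECONDITION & SPEC =====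
def Spec_vocal_repetition (vocals : List String) (s : String) (out : Int) : Prop := out = vocal_repetition_alt vocals s
instance (vocals : List String) (s : String) (out : Int) : Decidable (Spec_vocal_repetition vocals s out) := by unfold Spec_vocal_repetition; infer_instance

-- ===== CLAIM (what is proved, stated in full; the proofs are below) =====
def Claim_equal_vocal_repetition : Prop := ∀ (vocals : List String) (s : String), Dom_vocal_repetition vocals s → Spec_vocal_repetition vocals s (vocal_repetition vocals s)

-- ===== LEMMAS AND PROOFS =====

-- number of occurrences of the char x among cs matching the string v
def cntV (v : String) (cs : List Char) : Int := (cs.countP (fun x => String.ofList [x] == v) : Int)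

-- how many entries (v, flag) of zip(vocals, flags) match x with the flag already set
def cntDup (vs : List String) (x : Char) (l : List Bool) : Int :=
  ((vs.zip l).countP (fun p => (String.ofList [x] == p.1) && p.2) : Int)

-- flags after processing one char x
def newFlags (vs : List String) (x : Char) (l : List Bool) : List Bool :=
  List.zipWith (fun v b => b || (String.ofList [x] == v)) vs l

-- counter accumulated by the rest of the string given current flags
def contribSum (vs : List String) (l : List Bool) (cs : List Char) : Int :=
  match vs, l with
  | v :: vs, b :: l => (if b then cntV v cs else max (cntV v cs - 1) 0) + contribSum vs l cs
  | _, _ => 0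

lemma innerStepA_lift (v : String) (vs : List String) (x : Char) (b : Bool)
    (st : Int × List Bool) (i : Nat) :
    innerStepA (v :: vs) x (st.1, b :: st.2) (i + 1)
      = ((innerStepA vs x st i).1, b :: (innerStepA vs x st i).2) := by
  simp only [innerStepA, List.getD_cons_succ, List.set_cons_succ]
  split_ifs <;> rfl

lemma inner_fold_eq (vs : List String) (x : Char) :
    ∀ (c : Int) (l : List Bool), l.length = vs.length →
    (List.range vs.length).foldl (innerStepA vs x) (c, l)
      = (c + cntDup vs x l, newFlags vs x l) := by
  induction vs with
  | nil =>
    intro c l hl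
    rw [List.length_eq_zero_iff.mp hl]
    simp [cntDup, newFlags]
  | cons v vs ih =>
    intro c l hl
    match l with
    | b :: t =>
      have ht : t.length = vs.length := by simpa using hl
      rw [List.length_cons, List.range_succ_eq_map, List.foldl_cons, List.foldl_map]
      have h0 : innerStepA (v :: vs) x (c, b :: t) 0
          = ((if (String.ofList [x] == v) && b then c + 1 else c),
             (b || (String.ofList [x] == v)) :: t) := by
        simp only [innerStepA, List.getD_cons_zero, List.set_cons_zero]
        cases hxv : (String.ofList [x] == v) <;> cases b <;> simp
      rw [h0]
      have hhom := List.foldl_hom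
        (f := fun st : Int × List Bool =>
          (st.1, (b || (String.ofList [x] == v)) :: st.2))
        (g₁ := innerStepA vs x)
        (g₂ := fun st i => innerStepA (v :: vs) x st (i + 1))
        (l := List.range vs.length)
        (init := ((if (String.ofList [x] == v) && b then c + 1 else c), t))
        (by intro st i; exact innerStepA_lift v vs x _ st i)
      simp only at hhom
      rw [hhom, ih _ t ht]
      simp only [cntDup, newFlags, List.zip_cons_cons, List.countP_cons, List.zipWith_cons_cons]
      cases hxv : (String.ofList [x] == v) <;> cases b <;>
        simp [hxv] <;> push_cast <;> ring

lemma contribSum_nil (vs : List String) (l : List Bool) : contribSum vs l [] = 0 := by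
  induction vs generalizing l with
  | nil => cases l <;> rfl
  | cons v vs ih =>
    cases l with
    | nil => rfl
    | cons b t => simp [contribSum, cntV, ih]

lemma cntV_cons (v : String) (x : Char) (cs : List Char) :
    cntV v (x :: cs) = (if String.ofList [x] == v then 1 else 0) + cntV v cs := by
  simp only [cntV, List.countP_cons]
  split_ifs <;> push_cast <;> ring

lemma contribSum_step (vs : List String) (x : Char) (l : List Bool) (cs : List Char) :
    cntDup vs x l + contribSum vs (newFlags vs x l) cs = contribSum vs l (x :: cs) := by
  induction vs generalizing l with
  | nil => simp [cntDup, newFlags, contribSum]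
  | cons v vs ih =>
    cases l with
    | nil => simp [cntDup, newFlags, contribSum]
    | cons b t =>
      have hih := ih t
      have hc := cntV_cons v x cs
      have hnn : (0 : Int) ≤ cntV v cs := Int.natCast_nonneg _
      simp only [cntDup, newFlags, List.zip_cons_cons, List.countP_cons,
        List.zipWith_cons_cons, contribSum] at hih ⊢
      cases hxv : (String.ofList [x] == v) <;> cases b
      · norm_num [hxv] at hc
        simp [hxv]
        rw [hc]
        linarith [hih]
      · norm_num [hxv] at hc
        simp [hxv]
        rw [hc]
        linarith [hih]
      · norm_num [hxv] at hc
        simp [hxv]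
        rw [hc, show (1 : Int) + cntV v cs - 1 = cntV v cs by ring, max_eq_left hnn]
        linarith [hih]
      · norm_num [hxv] at hc
        simp [hxv]
        rw [hc]
        linarith [hih]

lemma outer_fold_eq (vs : List String) :
    ∀ (cs : List Char) (c : Int) (l : List Bool), l.length = vs.length →
    (cs.foldl (fun st letter => (List.range vs.length).foldl (innerStepA vs letter) st) (c, l)).1
      = c + contribSum vs l cs := by
  intro cs
  induction cs with
  | nil => intro c l _; simp [contribSum_nil]
  | cons x cs ih =>
    intro c l hl
    rw [List.foldl_cons, inner_fold_eq vs x c l hl,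
      ih _ _ (by simp [newFlags, hl]), add_assoc, contribSum_step]

lemma freq_getD (s : String) (v : String) :
    ((s.toList.foldl (fun d ch => d.insert (String.ofList [ch]) (d.getD (String.ofList [ch]) 0 + 1))
        PySem.Dict.empty : PySem.Dict String Int)).getD v 0 = cntV v s.toList := by
  have h1 : (s.toList.foldl
      (fun d ch => d.insert (String.ofList [ch]) (d.getD (String.ofList [ch]) 0 + 1))
      (PySem.Dict.empty : PySem.Dict String Int))
      = (s.toList.map (fun ch => String.ofList [ch])).foldl
          (fun d k => d.insert k (d.getD k 0 + 1)) PySem.Dict.empty := by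
    rw [List.foldl_map]
  rw [h1, PySem.Dict.foldl_insert_getD_add_one_eq_counter, PySem.Dict.getD_counter]
  simp only [cntV, List.count, List.countP_map]
  rfl

lemma contribSum_false (vs : List String) (cs : List Char) :
    contribSum vs (List.replicate vs.length false) cs
      = (vs.map (fun v => max (cntV v cs - 1) 0)).sum := by
  induction vs with
  | nil => rfl
  | cons v vs ih => simp [contribSum, List.replicate_succ, ih]

-- ===== VERDICT (by name: the statement is the Claim_ definition above) =====
theorem vocal_repetition_spec : Claim_equal_vocal_repetition := by
  intro vocals s _
  unfold Spec_vocal_repetition vocal_repetition vocal_repetition_alt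
  have hmap : (List.range vocals.length).map (fun _ => false)
      = List.replicate vocals.length false := by
    simp [List.map_const']
  simp only [hmap]
  rw [outer_fold_eq vocals s.toList 0 _ (by simp), contribSum_false]
  simp only [zero_add]
  exact congrArg List.sum (List.map_congr_left (fun v _ => by rw [freq_getD]))
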